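-- pv_equiv track=rewrite | github.com/Faniry99/Exo2 | exo 2.py | simplify_karnaugh_map
-- ===== SOURCE A (Python) =====
-- def simplify_karnaugh_map(map):
--     simplified = []
--     num_vars = len(map)
--     num_cells = len(map[0])
--     for i in range(num_vars):
--         simplified.append([])
--         for j in range(num_cells):
--             simplified[i].append('X')
--
--     for i in range(num_vars):
--         for j in range(num_cells):
--             if map[i][j] == 1:
--                 simplified[i][j] = '1'
--                 for k in range(num_vars):
--                     if k != i and map[k][j] == 1:
--                         simplified[i][j] = '-'
--                         break
--                 if simplified[i][j] == '1':
--                     for k in range(num_cells):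
--                         if k != j and map[i][k] == 1:
--                             simplified[i][j] = '-'
--                             break
--
--     return simplified
-- ===== SOURCE B (Python) =====
-- def simplify_karnaugh_map(map):
--     n = len(map[0])
--     row_ones = [row[:n].count(1) for row in map]
--     col_ones = [sum(1 for row in map if row[j] == 1) for j in range(n)]
--     return [['X' if row[j] != 1
--              else ('-' if row_ones[i] > 1 or col_ones[j] > 1 else '1')
--              for j in range(n)]
--             for i, row in enumerate(map)]
-- ===== Notes on version B (the rewrite author's own statement) =====
-- stated objective: simpler
-- what changed: Replaced the per-cell inner scans over the whole row and column by precomputed per-row and per-column 1-counts consulted per cell.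
import Mathlib
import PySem

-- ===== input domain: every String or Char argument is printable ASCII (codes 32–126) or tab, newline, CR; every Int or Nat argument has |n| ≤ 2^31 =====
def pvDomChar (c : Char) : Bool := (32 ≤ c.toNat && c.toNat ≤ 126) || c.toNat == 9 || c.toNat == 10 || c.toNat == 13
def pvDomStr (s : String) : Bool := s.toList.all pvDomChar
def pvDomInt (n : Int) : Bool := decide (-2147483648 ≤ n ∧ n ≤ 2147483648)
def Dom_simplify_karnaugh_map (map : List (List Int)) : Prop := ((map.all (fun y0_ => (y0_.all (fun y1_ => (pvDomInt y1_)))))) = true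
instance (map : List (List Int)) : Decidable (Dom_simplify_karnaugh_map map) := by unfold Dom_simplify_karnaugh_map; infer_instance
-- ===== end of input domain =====

-- B classifies each cell from per-row / per-column 1-counts computed once, instead of
-- A's per-cell rescans of its whole row and column; objective: simpler.

-- ===== PORT A =====
def pvSetCell (s : List (List String)) (i j : Nat) (v : String) : List (List String) :=
  s.set i ((s.getD i []).set j v)

def pvGetCell (s : List (List String)) (i j : Nat) : String :=
  (s.getD i []).getD j ""

-- one iteration of A's inner `for j` body (the two break-loops become List.any)
def pvInnerStep (map : List (List Int)) (nv n i : Nat) (s : List (List String)) (j : Nat) :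
    List (List String) :=
  if (map.getD i []).getD j 0 = 1 then
    let s1 := pvSetCell s i j "1"
    let s2 := if (List.range nv).any (fun k => k ≠ i && (map.getD k []).getD j 0 == 1)
              then pvSetCell s1 i j "-" else s1
    if pvGetCell s2 i j = "1" then
      if (List.range n).any (fun k => k ≠ j && (map.getD i []).getD k 0 == 1)
      then pvSetCell s2 i j "-" else s2
    else s2
  else s

def simplify_karnaugh_map (map : List (List Int)) : List (List String) :=
  let nv := map.length
  let n := (map.headD []).length
  let init := (List.range nv).map (fun _ => (List.range n).map (fun _ => "X"))
  (List.range nv).foldl (fun s i => (List.range n).foldl (pvInnerStep map nv n i) s) init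

-- ===== PORT B =====
def simplify_karnaugh_map_alt (map : List (List Int)) : List (List String) :=
  let n := (map.headD []).length
  let row_ones : List Nat := map.map (fun row => (row.take n).count 1)
  let col_ones : List Nat := (List.range n).map (fun j => map.countP (fun row => row.getD j 0 == 1))
  map.mapIdx (fun i row =>
    (List.range n).map (fun j =>
      if row.getD j 0 ≠ 1 then "X"
      else if 1 < row_ones.getD i 0 ∨ 1 < col_ones.getD j 0 then "-" else "1"))

-- ===== PRECONDITION & SPEC =====
-- Pre_ excludes exactly the inputs on which Python A raises: the empty map (map[0] is an
-- IndexError) and ragged maps having a row shorter than row 0 (map[i][j] is an IndexError).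
def Pre_simplify_karnaugh_map (map : List (List Int)) : Prop :=
  map ≠ [] ∧ ∀ row ∈ map, (map.headD []).length ≤ row.length

instance (map : List (List Int)) : Decidable (Pre_simplify_karnaugh_map map) := by
  unfold Pre_simplify_karnaugh_map; infer_instance

def pvWitness_simplify_karnaugh_map : List (List Int) := [[1, 0], [0, 1]]

def Spec_simplify_karnaugh_map (map : List (List Int)) (out : List (List String)) : Prop := out = simplify_karnaugh_map_alt map
instance (map : List (List Int)) (out : List (List String)) : Decidable (Spec_simplify_karnaugh_map map out) := by unfold Spec_simplify_karnaugh_map; infer_instance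

-- ===== CLAIM (what is proved, stated in full; the proofs are below) =====
def Claim_equal_simplify_karnaugh_map : Prop := ∀ (map : List (List Int)), Dom_simplify_karnaugh_map map → Pre_simplify_karnaugh_map map → Spec_simplify_karnaugh_map map (simplify_karnaugh_map map)

-- ===== LEMMAS AND PROOFS =====

-- the value A's loop body leaves in cell (i, j)
def pvCellVal (map : List (List Int)) (nv n i j : Nat) : String :=
  if (map.getD i []).getD j 0 = 1 then
    if ((List.range nv).any (fun k => k ≠ i && (map.getD k []).getD j 0 == 1)
        || (List.range n).any (fun k => k ≠ j && (map.getD i []).getD k 0 == 1))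
    then "-" else "1"
  else "X"

def pvTargetRow (map : List (List Int)) (nv n i : Nat) : List String :=
  (List.range n).map (pvCellVal map nv n i)

theorem pv_getD_set_self {α : Type} (l : List α) (i : Nat) (a d : α) (h : i < l.length) :
    (l.set i a)[i]?.getD d = a := by
  simp [List.getElem?_set_self', List.getElem?_eq_getElem h]

theorem pv_set_getD_self {α : Type} (l : List α) (i : Nat) (d : α) (h : i < l.length) :
    l.set i (l.getD i d) = l := by
  rw [List.getD_eq_getElem?_getD, List.getElem?_eq_getElem h]
  simp

theorem pv_set_of_getElem? {α : Type} (l : List α) (i : Nat) (d : α) (h : l[i]? = some d) :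
    l.set i d = l := by
  obtain ⟨hlt, hv⟩ := List.getElem?_eq_some_iff.mp h
  subst hv; simp

-- folding "set slot j to g j (the slot still holding d)" over range m
theorem pv_fold_range {α : Type} (f : List α → Nat → List α) (g : Nat → α) (d : α) (n : Nat)
    (hf : ∀ (r : List α) (j : Nat), j < n → r.length = n → r[j]? = some d →
      f r j = r.set j (g j)) :
    ∀ m, m ≤ n → (List.range m).foldl f ((List.range n).map (fun _ => d)) =
      (List.range n).map (fun j => if j < m then g j else d) := by
  intro m
  induction m with
  | zero => intro _; simp
  | succ m ih =>
    intro hm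
    have hm' : m ≤ n := Nat.le_of_succ_le hm
    have hmn : m < n := Nat.lt_of_succ_le hm
    rw [List.range_succ, List.foldl_append, ih hm', List.foldl_cons, List.foldl_nil]
    rw [hf _ m hmn (by simp) (by simp [hmn])]
    apply List.ext_getElem (by simp)
    intro k hk1 hk2
    simp only [List.length_set, List.length_map, List.length_range] at hk1 hk2
    simp only [List.getElem_set, List.getElem_map, List.getElem_range]
    rcases Nat.lt_trichotomy k m with h | h | h
    · have h1 : m ≠ k := by omega
      rw [if_neg h1, if_pos h, if_pos (by omega : k < m + 1)]
    · subst h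
      rw [if_pos rfl, if_pos (by omega)]
    · have h1 : m ≠ k := by omega
      rw [if_neg h1, if_neg (by omega : ¬ k < m), if_neg (by omega : ¬ k < m + 1)]

theorem pvSetCell_setCell (s : List (List String)) (i j : Nat) (a b : String)
    (hi : i < s.length) : pvSetCell (pvSetCell s i j a) i j b = pvSetCell s i j b := by
  simp only [pvSetCell, List.getD_eq_getElem?_getD]
  rw [pv_getD_set_self _ _ _ _ hi, List.set_set, List.set_set]

theorem pvGetCell_setCell (s : List (List String)) (i j : Nat) (v : String)
    (hi : i < s.length) (hj : j < (s.getD i []).length) :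
    pvGetCell (pvSetCell s i j v) i j = v := by
  rw [List.getD_eq_getElem?_getD] at hj
  simp only [pvGetCell, pvSetCell, List.getD_eq_getElem?_getD]
  rw [pv_getD_set_self _ _ _ _ hi, pv_getD_set_self _ _ _ _ (by simpa using hj)]

-- A's inner step with the two writes and the read-back collapsed to one conditional write
theorem pv_step_core (s : List (List String)) (i j : Nat) (hi : i < s.length)
    (hj : j < (s.getD i []).length) (c r : Bool) (v : Int) :
    (if v = 1 then
      let s1 := pvSetCell s i j "1"
      let s2 := if c then pvSetCell s1 i j "-" else s1
      if pvGetCell s2 i j = "1" then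
        if r then pvSetCell s2 i j "-" else s2
      else s2
    else s)
    = (if v = 1 then pvSetCell s i j (if v = 1 then (if (c || r) then "-" else "1") else "X") else s) := by
  by_cases hv : v = 1
  · rw [if_pos hv, if_pos hv, if_pos hv]
    cases c <;> cases r <;>
      simp [pvSetCell_setCell _ _ _ _ _ hi, pvGetCell_setCell _ _ _ _ hi hj]
  · rw [if_neg hv, if_neg hv]

-- A's inner step, written as a single conditional write of the final cell value
theorem pvInnerStep_simple (map : List (List Int)) (nv n i : Nat) (s : List (List String))
    (j : Nat) (hi : i < s.length) (hj : j < (s.getD i []).length) :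
    pvInnerStep map nv n i s j =
      if (map.getD i []).getD j 0 = 1 then pvSetCell s i j (pvCellVal map nv n i j) else s := by
  unfold pvInnerStep pvCellVal
  exact pv_step_core s i j hi hj _ _ _

-- the inner fold only rewrites row i, so it factors through that row
theorem pv_inner_fold_factor (map : List (List Int)) (nv n i : Nat) :
    ∀ (js : List Nat) (s : List (List String)), (∀ j ∈ js, j < n) → i < s.length →
      (s.getD i []).length = n →
      js.foldl (pvInnerStep map nv n i) s =
        s.set i (js.foldl
          (fun r j => if (map.getD i []).getD j 0 = 1 then r.set j (pvCellVal map nv n i j) else r)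
          (s.getD i [])) := by
  intro js
  induction js with
  | nil => intro s _ hi _; exact (pv_set_getD_self s i [] hi).symm
  | cons j js ih =>
    intro s hjs hi hrow
    have hjn : j < n := hjs j (List.mem_cons_self)
    rw [List.foldl_cons, List.foldl_cons]
    rw [pvInnerStep_simple map nv n i s j hi (by omega)]
    by_cases h1 : (map.getD i []).getD j 0 = 1
    · rw [if_pos h1, if_pos h1]
      rw [ih (pvSetCell s i j (pvCellVal map nv n i j)) (fun a ha => hjs a (List.mem_cons_of_mem _ ha))
        (by simp [pvSetCell, hi])
        (by
          simp only [pvSetCell, List.getD_eq_getElem?_getD]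
          rw [pv_getD_set_self _ _ _ _ hi, List.length_set]
          rw [List.getD_eq_getElem?_getD] at hrow
          exact hrow)]
      simp only [pvSetCell, List.getD_eq_getElem?_getD]
      rw [pv_getD_set_self _ _ _ _ hi, List.set_set]
    · rw [if_neg h1, if_neg h1]
      exact ih s (fun a ha => hjs a (List.mem_cons_of_mem _ ha)) hi hrow

-- A's whole computation is the per-cell formula pvCellVal
theorem pvA_eq_target (map : List (List Int)) :
    simplify_karnaugh_map map =
      (List.range map.length).map (pvTargetRow map map.length (map.headD []).length) := by
  simp only [simplify_karnaugh_map]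
  have hrow : ∀ (i : Nat),
      (List.range (map.headD []).length).foldl
        (fun r j => if (map.getD i []).getD j 0 = 1 then r.set j (pvCellVal map map.length (map.headD []).length i j) else r)
        ((List.range (map.headD []).length).map (fun _ => "X")) =
      pvTargetRow map map.length (map.headD []).length i := by
    intro i
    rw [pv_fold_range _ (pvCellVal map map.length (map.headD []).length i) "X" _
      (by
        intro r j hj hlen hslot
        by_cases h1 : (map.getD i []).getD j 0 = 1
        · rw [if_pos h1]
        · rw [if_neg h1]
          have hx : pvCellVal map map.length (map.headD []).length i j = "X" := by
            rw [pvCellVal, if_neg h1]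
          rw [hx, pv_set_of_getElem? r j "X" hslot])
      _ (Nat.le_refl _)]
    rw [pvTargetRow]
    apply List.map_congr_left
    intro j hjmem
    rw [if_pos (List.mem_range.mp hjmem)]
  rw [pv_fold_range _ (pvTargetRow map map.length (map.headD []).length)
      ((List.range (map.headD []).length).map (fun _ => "X")) map.length
    (by
      intro s i hiv hlen hslot
      have hgetD : s.getD i [] = (List.range (map.headD []).length).map (fun _ => "X") := by
        rw [List.getD_eq_getElem?_getD, hslot]; rfl
      rw [pv_inner_fold_factor map map.length (map.headD []).length i (List.range (map.headD []).length) s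
        (fun j hj => List.mem_range.mp hj) (by omega) (by rw [hgetD]; simp)]
      rw [hgetD, hrow i])
    map.length (Nat.le_refl _)]
  apply List.map_congr_left
  intro i himem
  rw [if_pos (List.mem_range.mp himem)]

-- counting over a list equals counting matching indices
theorem pv_countP_eq_range {α : Type} (l : List α) (d : α) (p : α → Bool) :
    l.countP p = (List.range l.length).countP (fun k => p (l.getD k d)) := by
  induction l with
  | nil => simp
  | cons a tl ih =>
    rw [List.countP_cons, List.length_cons, List.range_succ_eq_map, List.countP_cons,
      List.countP_map]
    have : ((List.range tl.length).countP ((fun k => p ((a :: tl).getD k d)) ∘ (· + 1)))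
        = (List.range tl.length).countP (fun k => p (tl.getD k d)) := by
      apply List.countP_congr
      intro k _
      rfl
    rw [this, ← ih]
    simp [List.getD_cons_zero]

theorem pv_count_take_eq (r : List Int) (n : Nat) :
    (r.take n).count 1 = (List.range n).countP (fun k => r.getD k 0 == 1) := by
  induction n with
  | zero => simp
  | succ n ih =>
    rw [List.range_succ, List.countP_append, ← ih, List.take_add_one, List.count_append]
    have hsing : (r[n]?.toList).count 1 = List.countP (fun k => r.getD k 0 == 1) [n] := by
      simp only [List.countP_cons, List.countP_nil, List.getD_eq_getElem?_getD]
      cases h : r[n]? with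
      | none => simp [h]
      | some v =>
        by_cases hv : v = 1
        · subst hv; simp [h]
        · simp [h, hv]
    omega

-- a predicate that forces its argument to equal t is counted at most once on a Nodup list
theorem pv_countP_nodup_single (l : List Nat) (hl : l.Nodup) (t : Nat) (q : Nat → Bool)
    (hq : ∀ k, q k = true → k = t) :
    l.countP q = if t ∈ l ∧ q t = true then 1 else 0 := by
  induction l with
  | nil => simp
  | cons a tl ih =>
    rw [List.countP_cons, ih (List.nodup_cons.mp hl).2]
    by_cases hqa : q a = true
    · have hat : a = t := hq a hqa
      subst hat
      have h2 : ¬ (a ∈ tl ∧ q a = true) := fun h => (List.nodup_cons.mp hl).1 h.1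
      rw [if_neg h2, if_pos (⟨by simp, hqa⟩ : a ∈ a :: tl ∧ q a = true), if_pos hqa]
    · have hmemiff : (t ∈ a :: tl ∧ q t = true) ↔ (t ∈ tl ∧ q t = true) := by
        constructor
        · rintro ⟨hm, hqt⟩
          rcases List.mem_cons.mp hm with h' | h'
          · exact absurd (h' ▸ hqt) hqa
          · exact ⟨h', hqt⟩
        · rintro ⟨hm, hqt⟩
          exact ⟨List.mem_cons_of_mem _ hm, hqt⟩
      rw [if_neg hqa, Nat.add_zero]
      exact (if_congr hmemiff rfl rfl).symm

-- splitting a count at a pivot index t with p t = true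
theorem pv_countP_pivot (n t : Nat) (p : Nat → Bool) (ht : t < n) (hp : p t = true) :
    (List.range n).countP p = 1 + (List.range n).countP (fun k => k ≠ t && p k) := by
  have hsplit : (List.range n).countP p
      = (List.range n).countP (fun k => k == t && p k)
        + (List.range n).countP (fun k => k ≠ t && p k) := by
    induction (List.range n) with
    | nil => simp
    | cons a tl ih =>
      rw [List.countP_cons, List.countP_cons, List.countP_cons, ih]
      by_cases hat : a = t
      · subst hat; simp [hp]
        omega
      · simp [hat]
        by_cases hpa : p a = true
        · simp [hpa]; omega
        · simp [hpa]
  have hone : (List.range n).countP (fun k => k == t && p k) = 1 := by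
    rw [pv_countP_nodup_single _ (List.nodup_range) t _
      (by intro k hk; simpa using (Bool.and_elim_left hk))]
    simp [List.mem_range.mpr ht, hp]
  omega

-- 1 < count ↔ some OTHER index matches, given that index t itself matches
theorem pv_one_lt_countP_iff (n t : Nat) (p : Nat → Bool) (ht : t < n) (hp : p t = true) :
    (1 < (List.range n).countP p) ↔ ((List.range n).any (fun k => k ≠ t && p k) = true) := by
  rw [pv_countP_pivot n t p ht hp]
  constructor
  · intro h
    have : 0 < (List.range n).countP (fun k => k ≠ t && p k) := by omega
    obtain ⟨a, ha, hpa⟩ := List.countP_pos_iff.mp this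
    exact List.any_eq_true.mpr ⟨a, ha, hpa⟩
  · intro h
    obtain ⟨a, ha, hpa⟩ := List.any_eq_true.mp h
    have : 0 < (List.range n).countP (fun k => k ≠ t && p k) :=
      List.countP_pos_iff.mpr ⟨a, ha, hpa⟩
    omega

-- ===== VERDICT (by name: the statement is the Claim_ definition above) =====
theorem simplify_karnaugh_map_spec : Claim_equal_simplify_karnaugh_map := by
  unfold Claim_equal_simplify_karnaugh_map
  intro map _ _
  unfold Spec_simplify_karnaugh_map
  rw [pvA_eq_target]
  simp only [simplify_karnaugh_map_alt]
  apply List.ext_getElem (by simp)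
  intro i hi1 hi2
  simp only [List.length_map, List.length_range] at hi1
  rw [List.getElem_mapIdx]
  rw [List.getElem_map, List.getElem_range]
  rw [pvTargetRow]
  apply List.map_congr_left
  intro j hjmem
  have hjn : j < (map.headD []).length := List.mem_range.mp hjmem
  have hrow : map.getD i [] = map[i] := by
    rw [List.getD_eq_getElem?_getD, List.getElem?_eq_getElem hi1]; rfl
  rw [pvCellVal, hrow]
  by_cases h1 : map[i].getD j 0 = 1
  · rw [if_pos h1]
    have hne : ¬ (map[i].getD j 0 ≠ 1) := by simpa using h1
    rw [if_neg hne]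
    have hrones : (map.map (fun row => (row.take (map.headD []).length).count 1)).getD i 0
        = (List.range (map.headD []).length).countP (fun k => map[i].getD k 0 == 1) := by
      rw [List.getD_eq_getElem?_getD, List.getElem?_eq_getElem (by simpa using hi1)]
      simp only [List.getElem_map, Option.getD_some]
      exact pv_count_take_eq _ _
    have hcones : ((List.range (map.headD []).length).map
          (fun j => map.countP (fun row => row.getD j 0 == 1))).getD j 0
        = (List.range map.length).countP (fun k => (map.getD k []).getD j 0 == 1) := by
      rw [List.getD_eq_getElem?_getD, List.getElem?_eq_getElem (by simpa using hjn)]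
      simp only [List.getElem_map, List.getElem_range, Option.getD_some]
      exact pv_countP_eq_range map [] _
    have hRiff := pv_one_lt_countP_iff (map.headD []).length j
      (fun k => map[i].getD k 0 == 1) hjn (by simpa using h1)
    have hCiff := pv_one_lt_countP_iff map.length i
      (fun k => (map.getD k []).getD j 0 == 1) hi1
      (by simpa using (show (map.getD i []).getD j 0 = 1 by rw [hrow]; exact h1))
    by_cases hor : ((List.range map.length).any (fun k => k ≠ i && (map.getD k []).getD j 0 == 1)
        || (List.range (map.headD []).length).any (fun k => k ≠ j && map[i].getD k 0 == 1)) = true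
    · rw [if_pos hor]
      have : 1 < (map.map (fun row => (row.take (map.headD []).length).count 1)).getD i 0
          ∨ 1 < ((List.range (map.headD []).length).map
              (fun j => map.countP (fun row => row.getD j 0 == 1))).getD j 0 := by
        rcases Bool.or_eq_true_iff.mp hor with h | h
        · right; rw [hcones]; exact hCiff.mpr h
        · left; rw [hrones]; exact hRiff.mpr h
      rw [if_pos this]
    · rw [if_neg hor]
      have hnor := Bool.or_eq_false_iff.mp (Bool.not_eq_true _ |>.mp hor)
      have : ¬ (1 < (map.map (fun row => (row.take (map.headD []).length).count 1)).getD i 0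
          ∨ 1 < ((List.range (map.headD []).length).map
              (fun j => map.countP (fun row => row.getD j 0 == 1))).getD j 0) := by
        rintro (h | h)
        · rw [hrones] at h
          have := hRiff.mp h
          rw [hnor.2] at this
          exact Bool.false_ne_true this
        · rw [hcones] at h
          have := hCiff.mp h
          rw [hnor.1] at this
          exact Bool.false_ne_true this
      rw [if_neg this]
  · rw [if_neg h1, if_pos (by simpa using h1)]
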